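-- pv_equiv track=rewrite | github.com/LRP-IVC/STSBench | annotator/mining/ego.py | merge_true_islands_center
-- ===== SOURCE A (Python) =====
-- def merge_true_islands_center(data):
--     """
--     Merges consecutive True values in a list into a single True at the center
--     of the island.  For even length islands, the right-center is chosen.
--
--     Args:
--         data: A list of boolean values.
--
--     Returns:
--         A new list with merged True islands.
--     """
--
--     n = len(data)
--     result = [False] * n
--
--     start_index = -1  # Start index of the current island
--     island_length = 0  # Length of the current island
--
--     for i in range(n):
--         if data[i]:
--             if island_length == 0:  # Start of a new island
--                 start_index = i
--             island_length += 1
--         else:  # Encountered a False value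
--             if island_length > 0:  # Process the previous island (if any)
--                 center_index = (
--                     start_index + (island_length - 1) // 2
--                 )  # Integer division for center
--                 result[center_index] = True
--             island_length = 0  # Reset for the next potential island
--
--     # Handle any island that might be at the very end of the list
--     if island_length > 0:
--         center_index = start_index + (island_length - 1) // 2
--         result[center_index] = True
--
--     return result
-- ===== SOURCE B (Python) =====
-- def merge_true_islands_center(data):
--     """Staged rewrite: first collect the boundary indices of the True islands
--     (run starts and run ends) with two comprehensions over neighbour pairs,
--     then pair them up with zip and mark each island's center."""
--     n = len(data)
--     starts = [i for i in range(n) if data[i] and (i == 0 or not data[i - 1])]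
--     ends = [i for i in range(n) if data[i] and (i == n - 1 or not data[i + 1])]
--     result = [False] * n
--     for s, e in zip(starts, ends):
--         result[s + (e - s) // 2] = True
--     return result
-- ===== Notes on version B (the rewrite author's own statement) =====
-- stated objective: alternative
-- what changed: Replaced the single-pass state machine (start_index/island_length registers mutated per element, plus a trailing-island fixup after the loop) with staged passes: two neighbour-pair comprehensions collect the island start indices and end indices, zip pairs each start with its end, and one short loop marks each island's center.
import Mathlib
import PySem

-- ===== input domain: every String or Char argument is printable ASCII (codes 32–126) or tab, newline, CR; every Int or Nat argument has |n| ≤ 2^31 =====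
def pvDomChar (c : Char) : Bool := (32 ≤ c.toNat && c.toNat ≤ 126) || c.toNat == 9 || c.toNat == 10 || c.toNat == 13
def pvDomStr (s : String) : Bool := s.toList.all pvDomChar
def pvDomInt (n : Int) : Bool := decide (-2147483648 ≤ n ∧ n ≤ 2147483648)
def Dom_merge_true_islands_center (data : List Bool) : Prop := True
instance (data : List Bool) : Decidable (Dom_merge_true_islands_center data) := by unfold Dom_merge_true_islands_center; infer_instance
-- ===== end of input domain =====

-- B replaces A's single-pass state machine by staged passes: two neighbour-pair
-- comprehensions collect the island start and end indices, zip pairs them up,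
-- and each island's center is marked; same O(n) cost ('alternative').

-- ===== PORT A =====
-- loop body of 'for i in range(n)': state = (result, start_index, island_length);
-- the boolean data[i] is passed alongside i (it is exactly PySem.List.pyGetD data i false, see stepA).
def stepE (st : List Bool × Int × Int) (p : Int × Bool) : List Bool × Int × Int :=
  if p.2 then
    (st.1, (if st.2.2 = 0 then p.1 else st.2.1), st.2.2 + 1)
  else
    if st.2.2 > 0 then
      (PySem.List.pySetD st.1 (st.2.1 + PySem.Int.floordiv (st.2.2 - 1) 2) true, st.2.1, 0)
    else
      (st.1, st.2.1, 0)

def stepA (data : List Bool) (st : List Bool × Int × Int) (i : Int) : List Bool × Int × Int :=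
  stepE st (i, PySem.List.pyGetD data i false)   -- data[i]: i ∈ range(n), always in range

-- trailing-island fixup after the loop
def finishA (st : List Bool × Int × Int) : List Bool :=
  if st.2.2 > 0 then
    PySem.List.pySetD st.1 (st.2.1 + PySem.Int.floordiv (st.2.2 - 1) 2) true
  else
    st.1

def merge_true_islands_center (data : List Bool) : List Bool :=
  -- n = len(data); result = [False]*n; the for-loop; then the trailing fixup
  finishA ((PySem.List.pyRange 0 (PySem.List.len data) 1).foldl (stepA data)
    (List.replicate (PySem.List.len data).toNat false, -1, 0))

-- ===== PORT B =====
-- 'data[i] and (i == 0 or not data[i-1])' (run start test; the i==0 disjunct shields data[-1])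
def condStart (data : List Bool) (i : Int) : Bool :=
  PySem.List.pyGetD data i false && (i == 0 || !(PySem.List.pyGetD data (i - 1) false))

-- 'data[i] and (i == n-1 or not data[i+1])' (run end test)
def condEnd (data : List Bool) (i : Int) : Bool :=
  PySem.List.pyGetD data i false && (i == PySem.List.len data - 1 || !(PySem.List.pyGetD data (i + 1) false))

-- 'result[s + (e - s) // 2] = True'
def markB (res : List Bool) (p : Int × Int) : List Bool :=
  PySem.List.pySetD res (p.1 + PySem.Int.floordiv (p.2 - p.1) 2) true

def merge_true_islands_center_alt (data : List Bool) : List Bool :=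
  let n := PySem.List.len data
  let starts := (PySem.List.pyRange 0 n 1).filter (condStart data)
  let ends := (PySem.List.pyRange 0 n 1).filter (condEnd data)
  (starts.zip ends).foldl markB (List.replicate n.toNat false)

-- ===== PRECONDITION & SPEC =====
def Spec_merge_true_islands_center (data : List Bool) (out : List Bool) : Prop := out = merge_true_islands_center_alt data
instance (data : List Bool) (out : List Bool) : Decidable (Spec_merge_true_islands_center data out) := by unfold Spec_merge_true_islands_center; infer_instance

-- ===== CLAIM =====
def Claim_equal_merge_true_islands_center : Prop := ∀ (data : List Bool), Dom_merge_true_islands_center data → Spec_merge_true_islands_center data (merge_true_islands_center data)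

-- ===== LEMMAS AND PROOFS =====

-- canonical description both ports are reduced to: island-by-island rendering
def pvRunLen : List Bool → Nat
  | true :: r => pvRunLen r + 1
  | _ => 0

def pvMkRun (length : Nat) : List Bool := (List.replicate length false).set ((length - 1) / 2) true

def pvGo : List Bool → List Bool
  | [] => []
  | false :: r => false :: pvGo r
  | true :: r => pvMkRun (pvRunLen r + 1) ++ pvGo (r.drop (pvRunLen r))
termination_by xs => xs.length
decreasing_by all_goals (try rw [List.length_drop]); simp only [List.length_cons]; omega

-- === A = pvGo ===

theorem merge_true_islands_center_main :
    ∀ n : Nat,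
      (∀ rest : List Bool, rest.length = n → ∀ (pre : List Bool) (s0 : Int),
        finishA ((PySem.List.enumerate rest (pre.length : Int)).foldl stepE
          (pre ++ List.replicate rest.length false, s0, 0)) = pre ++ pvGo rest) ∧
      (∀ rest : List Bool, rest.length = n → ∀ (pre : List Bool) (L : Nat), 1 ≤ L →
        finishA ((PySem.List.enumerate rest ((pre.length : Int) + L)).foldl stepE
          (pre ++ List.replicate (L + rest.length) false, (pre.length : Int), (L : Int))) =
          pre ++ pvMkRun (L + pvRunLen rest) ++ pvGo (rest.drop (pvRunLen rest))) := by
  intro n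
  induction n using Nat.strong_induction_on with
  | _ n ih =>
    constructor
    · rintro (_ | ⟨b, r⟩) hlen pre s0
      · simp [PySem.List.enumerate_nil, finishA, pvGo]
      · cases b
        · -- head False, no pending island: just move on
          rw [PySem.List.enumerate_cons, List.foldl_cons]
          have hstep : stepE (pre ++ List.replicate (false :: r).length false, s0, 0)
              ((pre.length : Int), false) = (pre ++ List.replicate (false :: r).length false, s0, 0) := by
            simp [stepE]
          rw [hstep]
          have h1 := (ih r.length (by simp at hlen; omega)).1 r rfl (pre ++ [false]) s0
          have e1 : ((pre ++ [false]).length : Int) = (pre.length : Int) + 1 := by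
            simp
          have e2 : (pre ++ [false]) ++ List.replicate r.length false
              = pre ++ List.replicate (false :: r).length false := by
            simp [List.replicate_succ]
          rw [e1, e2] at h1
          rw [h1]
          simp [pvGo]
        · -- head True, island of length 1 starts here
          rw [PySem.List.enumerate_cons, List.foldl_cons]
          have hstep : stepE (pre ++ List.replicate (true :: r).length false, s0, 0)
              ((pre.length : Int), true)
              = (pre ++ List.replicate (true :: r).length false, (pre.length : Int), 1) := by
            simp [stepE]
          rw [hstep]
          have h2 := (ih r.length (by simp at hlen; omega)).2 r rfl pre 1 le_rfl
          have e1 : (pre.length : Int) + ((1 : Nat) : Int) = (pre.length : Int) + 1 := by norm_num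
          have e2 : List.replicate (1 + r.length) false = List.replicate (true :: r).length false := by
            simp [Nat.add_comm]
          rw [e1, e2] at h2
          have e3 : ((1 : Nat) : Int) = (1 : Int) := by norm_num
          rw [e3] at h2
          rw [h2]
          simp [pvGo, pvRunLen, Nat.add_comm]
    · rintro (_ | ⟨b, r⟩) hlen pre L hL
      · -- end of list with a pending island: the fixup fires
        simp only [List.length_nil, Nat.add_zero, PySem.List.enumerate_nil, List.foldl_nil]
        have hgt : (0 : Int) < (L : Int) := by exact_mod_cast hL
        have hfin : finishA (pre ++ List.replicate L false, (pre.length : Int), (L : Int))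
            = PySem.List.pySetD (pre ++ List.replicate L false)
                ((pre.length : Int) + PySem.Int.floordiv ((L : Int) - 1) 2) true := by
          unfold finishA
          rw [if_pos hgt]
        rw [hfin]
        have ef : PySem.Int.floordiv ((L : Int) - 1) 2 = (((L - 1) / 2 : Nat) : Int) := by
          have h1 : ((L : Int) - 1) = (((L - 1 : Nat)) : Int) := by omega
          rw [h1]
          exact_mod_cast PySem.Int.floordiv_natCast (L - 1) 2
        rw [ef]
        have eI : (pre.length : Int) + (((L - 1) / 2 : Nat) : Int) = ((pre.length + (L - 1) / 2 : Nat) : Int) := by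
          push_cast; ring
        rw [eI, PySem.List.pySetD_natCast]
        rw [List.set_append_right _ _ (by omega)]
        simp [pvMkRun, pvRunLen, pvGo]
      · cases b
        · -- head False closes the pending island: set its center, then continue clean
          rw [PySem.List.enumerate_cons, List.foldl_cons]
          have hgt : (0 : Int) < (L : Int) := by exact_mod_cast hL
          have ef : PySem.Int.floordiv ((L : Int) - 1) 2 = (((L - 1) / 2 : Nat) : Int) := by
            have h1 : ((L : Int) - 1) = (((L - 1 : Nat)) : Int) := by omega
            rw [h1]
            exact_mod_cast PySem.Int.floordiv_natCast (L - 1) 2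
          have hstep : stepE (pre ++ List.replicate (L + (false :: r).length) false, (pre.length : Int), (L : Int))
              (((pre.length : Int) + L), false)
              = ((pre ++ pvMkRun L ++ [false]) ++ List.replicate r.length false, (pre.length : Int), 0) := by
            simp only [stepE]
            rw [if_neg (by simp), if_pos hgt, ef]
            have eI : (pre.length : Int) + (((L - 1) / 2 : Nat) : Int)
                = ((pre.length + (L - 1) / 2 : Nat) : Int) := by push_cast; ring
            rw [eI, PySem.List.pySetD_natCast]
            rw [List.set_append_right _ _ (by omega)]
            have esplit : List.replicate (L + (false :: r).length) false
                = List.replicate L false ++ (false :: List.replicate r.length false) := by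
              simp [← List.replicate_append_replicate, List.replicate_succ]
            rw [esplit]
            rw [List.set_append_left _ _ (by simp; omega)]
            simp [pvMkRun]
          rw [hstep]
          have h1 := (ih r.length (by simp at hlen; omega)).1 r rfl (pre ++ pvMkRun L ++ [false]) (pre.length : Int)
          have elen : (((pre ++ pvMkRun L ++ [false]).length : Nat) : Int) = (pre.length : Int) + (L : Int) + 1 := by
            simp [pvMkRun]
            omega
          rw [elen] at h1
          rw [h1]
          simp [pvGo, pvRunLen, pvMkRun]
        · -- head True extends the pending island
          rw [PySem.List.enumerate_cons, List.foldl_cons]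
          have hne : ¬ (((pre ++ List.replicate (L + (true :: r).length) false, (pre.length : Int), (L : Int)).2.2) = 0) := by
            simp; omega
          have hstep : stepE (pre ++ List.replicate (L + (true :: r).length) false, (pre.length : Int), (L : Int))
              (((pre.length : Int) + L), true)
              = (pre ++ List.replicate ((L + 1) + r.length) false, (pre.length : Int), ((L + 1 : Nat) : Int)) := by
            simp only [stepE]
            rw [if_pos (by simp), if_neg hne]
            refine congrArg₂ Prod.mk ?_ (congrArg₂ Prod.mk rfl ?_)
            · have h3 : L + (true :: r).length = (L + 1) + r.length := by simp; omega
              rw [h3]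
            · push_cast; ring
          have hrep : List.replicate (L + (true :: r).length) false
              = List.replicate ((L + 1) + r.length) false := by
            congr 1
            simp
            omega
          rw [hrep] at hstep ⊢
          rw [hstep]
          have h2 := (ih r.length (by simp at hlen; omega)).2 r rfl pre (L + 1) (by omega)
          have e1 : (pre.length : Int) + ((L + 1 : Nat) : Int) = (pre.length : Int) + (L : Int) + 1 := by
            push_cast; ring
          rw [e1] at h2
          rw [h2]
          have e2 : (L + 1) + pvRunLen r = L + pvRunLen (true :: r) := by
            simp [pvRunLen]; omega
          rw [e2]
          simp [pvRunLen, List.drop_succ_cons]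

-- A's foldl over range(n) with data[i] is the fold of stepE over enumerate data 0
theorem merge_true_islands_center_bridge (data : List Bool) (init : List Bool × Int × Int) :
    (PySem.List.pyRange 0 (PySem.List.len data) 1).foldl (stepA data) init
      = (PySem.List.enumerate data 0).foldl stepE init := by
  rw [PySem.List.enumerate_eq_map_pyRange (d := false), List.foldl_map]
  rfl

theorem portA_eq_pvGo (data : List Bool) : merge_true_islands_center data = pvGo data := by
  unfold merge_true_islands_center
  rw [merge_true_islands_center_bridge]
  have h := (merge_true_islands_center_main data.length).1 data rfl [] (-1)
  simpa using h

-- === B = pvGo ===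

-- Nat-level recursive descriptions of B's two boundary comprehensions
def pvStarts : List Bool → Bool → Nat → List Nat
  | [], _, _ => []
  | b :: r, prev, k => (if b && !prev then [k] else []) ++ pvStarts r b (k + 1)

def pvEnds : List Bool → Nat → List Nat
  | [], _ => []
  | b :: r, k => (if b && !(r.headD false) then [k] else []) ++ pvEnds r (k + 1)

-- the paired boundaries, island by island
def runPairs : List Bool → Nat → List (Nat × Nat)
  | [], _ => []
  | false :: r, k => runPairs r (k + 1)
  | true :: r, k => (k, k + pvRunLen r) :: runPairs (r.drop (pvRunLen r)) (k + pvRunLen r + 1)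
termination_by xs _ => xs.length
decreasing_by all_goals (try rw [List.length_drop]); simp only [List.length_cons]; omega

theorem condStart_eval (pre : List Bool) (b : Bool) (r : List Bool) :
    condStart (pre ++ b :: r) (pre.length : Int) = (b && !(pre.getLastD false)) := by
  unfold condStart
  have hget : PySem.List.pyGetD (pre ++ b :: r) (pre.length : Int) false = b := by
    rw [PySem.List.pyGetD_natCast]
    simp [List.getD, List.getElem?_append_right (Nat.le_refl pre.length)]
  rw [hget]
  rcases pre with _ | ⟨c, p⟩
  · simp
  · have hne : (((c :: p).length : Int) == 0) = false := by
      simp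
      omega
    rw [hne]
    have e1 : ((c :: p).length : Int) - 1 = (((c :: p).length - 1 : Nat) : Int) := by
      simp
    rw [e1, PySem.List.pyGetD_natCast]
    have hlt : (c :: p).length - 1 < (c :: p).length := by simp
    have hprev : ((c :: p) ++ b :: r).getD ((c :: p).length - 1) false = (c :: p).getLastD false := by
      rw [List.getD, List.getElem?_append_left hlt]
      rw [List.getLastD_eq_getLast?, List.getLast?_eq_getElem?]
    rw [hprev]
    simp

theorem condEnd_eval (pre : List Bool) (b : Bool) (r : List Bool) :
    condEnd (pre ++ b :: r) (pre.length : Int) = (b && !(r.headD false)) := by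
  unfold condEnd
  have hget : PySem.List.pyGetD (pre ++ b :: r) (pre.length : Int) false = b := by
    rw [PySem.List.pyGetD_natCast]
    simp [List.getD, List.getElem?_append_right (Nat.le_refl pre.length)]
  rw [hget]
  have e1 : (pre.length : Int) + 1 = ((pre.length + 1 : Nat) : Int) := by push_cast; ring
  have hnext : PySem.List.pyGetD (pre ++ b :: r) ((pre.length : Int) + 1) false = r.headD false := by
    rw [e1, PySem.List.pyGetD_natCast]
    rcases r with _ | ⟨c, r'⟩
    · rw [List.getD_eq_default _ _ (by simp)]
      rfl
    · rw [List.getD, List.getElem?_append_right (by omega)]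
      simp
  rw [hnext]
  rcases r with _ | ⟨c, r'⟩
  · have hlast : ((pre.length : Int) == (PySem.List.len (pre ++ [b]) - 1)) = true := by
      simp [PySem.List.len]
    rw [hlast]
    simp
  · have hlast : ((pre.length : Int) == (PySem.List.len (pre ++ b :: c :: r') - 1)) = false := by
      simp [PySem.List.len]
      omega
    rw [hlast]
    simp

theorem starts_filter : ∀ (rest pre : List Bool),
    (List.range' pre.length rest.length).filter (fun k : Nat => condStart (pre ++ rest) (k : Int))
      = pvStarts rest (pre.getLastD false) pre.length := by
  intro rest
  induction rest with
  | nil => intro pre; simp [pvStarts]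
  | cons b r ih =>
    intro pre
    rw [List.length_cons, List.range'_succ, List.filter_cons]
    have hc : condStart (pre ++ b :: r) ((pre.length : Nat) : Int) = (b && !(pre.getLastD false)) :=
      condStart_eval pre b r
    have ihp := ih (pre ++ [b])
    rw [List.length_append] at ihp
    have e2 : (pre ++ [b]) ++ r = pre ++ b :: r := by simp
    rw [e2, List.getLastD_concat] at ihp
    have ihp' : List.filter (fun k : Nat => condStart (pre ++ b :: r) (k : Int))
        (List.range' (pre.length + 1) r.length) = pvStarts r b (pre.length + 1) := by
      simpa using ihp
    show _ = pvStarts (b :: r) (pre.getLastD false) pre.length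
    unfold pvStarts
    rw [hc]
    cases hb : (b && !(pre.getLastD false)) <;> simp [hb, ihp']

theorem ends_filter : ∀ (rest pre : List Bool),
    (List.range' pre.length rest.length).filter (fun k : Nat => condEnd (pre ++ rest) (k : Int))
      = pvEnds rest pre.length := by
  intro rest
  induction rest with
  | nil => intro pre; simp [pvEnds]
  | cons b r ih =>
    intro pre
    rw [List.length_cons, List.range'_succ, List.filter_cons]
    have hc : condEnd (pre ++ b :: r) ((pre.length : Nat) : Int) = (b && !(r.headD false)) :=
      condEnd_eval pre b r
    have ihp := ih (pre ++ [b])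
    rw [List.length_append] at ihp
    have e2 : (pre ++ [b]) ++ r = pre ++ b :: r := by simp
    rw [e2] at ihp
    have ihp' : List.filter (fun k : Nat => condEnd (pre ++ b :: r) (k : Int))
        (List.range' (pre.length + 1) r.length) = pvEnds r (pre.length + 1) := by
      simpa using ihp
    show _ = pvEnds (b :: r) pre.length
    unfold pvEnds
    rw [hc]
    cases hb : (b && !(r.headD false)) <;> simp [hb, ihp']

theorem pvRunLen_le (r : List Bool) : pvRunLen r ≤ r.length := by
  induction r with
  | nil => simp [pvRunLen]
  | cons b r ih => cases b <;> simp [pvRunLen] <;> omega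

theorem pvStarts_cons (b : Bool) (r : List Bool) (prev : Bool) (k : Nat) :
    pvStarts (b :: r) prev k = (if b && !prev then [k] else []) ++ pvStarts r b (k + 1) := by
  simp [pvStarts]

theorem pvEnds_cons (b : Bool) (r : List Bool) (k : Nat) :
    pvEnds (b :: r) k = (if b && !(r.headD false) then [k] else []) ++ pvEnds r (k + 1) := by
  simp [pvEnds]

theorem drop_runLen_head (r : List Bool) : (r.drop (pvRunLen r)).headD false = false := by
  induction r with
  | nil => simp
  | cons b r ih =>
    cases b
    · simp [pvRunLen]
    · simpa [pvRunLen] using ih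

theorem pvStarts_run (r : List Bool) : ∀ k, pvStarts r true k = pvStarts (r.drop (pvRunLen r)) true (k + pvRunLen r) := by
  induction r with
  | nil => intro k; simp [pvRunLen]
  | cons b r ih =>
    cases b
    · intro k; simp [pvRunLen]
    · intro k
      have e : k + pvRunLen (true :: r) = (k + 1) + pvRunLen r := by simp [pvRunLen]; omega
      have ed : List.drop (pvRunLen (true :: r)) (true :: r) = List.drop (pvRunLen r) r := by
        simp [pvRunLen]
      rw [pvStarts_cons, e, ed, ← ih (k + 1)]
      simp

theorem pvStarts_head_false (r : List Bool) (k : Nat) (h : r.headD false = false) :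
    pvStarts r true k = pvStarts r false k := by
  rcases r with _ | ⟨b, r'⟩
  · rfl
  · simp at h
    subst h
    simp [pvStarts_cons]

theorem pvEnds_run (r : List Bool) : ∀ k, pvEnds (true :: r) k = (k + pvRunLen r) :: pvEnds (r.drop (pvRunLen r)) (k + pvRunLen r + 1) := by
  induction r with
  | nil => intro k; simp [pvEnds_cons, pvEnds, pvRunLen]
  | cons b r ih =>
    cases b
    · intro k
      simp [pvEnds_cons, pvRunLen]
    · intro k
      have ed : List.drop (pvRunLen (true :: r)) (true :: r) = List.drop (pvRunLen r) r := by
        simp [pvRunLen]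
      have e1 : k + pvRunLen (true :: r) = k + 1 + pvRunLen r := by simp [pvRunLen]; omega
      rw [pvEnds_cons, ih (k + 1), ed, e1]
      simp

theorem zip_runPairs : ∀ n : Nat, ∀ rest : List Bool, rest.length = n → ∀ k,
    (pvStarts rest false k).zip (pvEnds rest k) = runPairs rest k := by
  intro n
  induction n using Nat.strong_induction_on with
  | _ n ih =>
    rintro (_ | ⟨b, r⟩) hlen k
    · simp [pvStarts, pvEnds, runPairs]
    · cases b
      · rw [pvStarts_cons, pvEnds_cons, runPairs]
        simpa using ih r.length (by simp at hlen; omega) r rfl (k + 1)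
      · rw [pvStarts_cons, pvEnds_run, pvStarts_run r (k + 1),
          pvStarts_head_false _ _ (drop_runLen_head r)]
        have e1 : k + 1 + pvRunLen r = k + pvRunLen r + 1 := by omega
        rw [e1, runPairs]
        have hlt : (r.drop (pvRunLen r)).length < n := by
          rw [List.length_drop]
          simp at hlen
          omega
        simpa using ih _ hlt (r.drop (pvRunLen r)) rfl (k + pvRunLen r + 1)

theorem fold_runPairs : ∀ n : Nat, ∀ rest : List Bool, rest.length = n → ∀ pre : List Bool,
    (runPairs rest pre.length).foldl (fun res p => markB res ((p.1 : Int), (p.2 : Int)))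
        (pre ++ List.replicate rest.length false)
      = pre ++ pvGo rest := by
  intro n
  induction n using Nat.strong_induction_on with
  | _ n ih =>
    rintro (_ | ⟨b, r⟩) hlen pre
    · simp [runPairs, pvGo]
    · cases b
      · rw [show runPairs (false :: r) pre.length = runPairs r (pre.length + 1) from by rw [runPairs]]
        have e2 : pre ++ List.replicate (false :: r).length false
            = (pre ++ [false]) ++ List.replicate r.length false := by
          simp [List.replicate_succ]
        rw [e2]
        have h1 := ih r.length (by simp at hlen; omega) r rfl (pre ++ [false])
        simp only [List.length_append, List.length_cons, List.length_nil, Nat.zero_add] at h1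
        rw [h1]
        simp [pvGo]
      · rw [show runPairs (true :: r) pre.length
            = (pre.length, pre.length + pvRunLen r) :: runPairs (r.drop (pvRunLen r)) (pre.length + pvRunLen r + 1)
            from by rw [runPairs]]
        rw [List.foldl_cons]
        have hm := pvRunLen_le r
        set m := pvRunLen r with hmdef
        have hmark : markB (pre ++ List.replicate (true :: r).length false)
              (((pre.length : Nat) : Int), ((pre.length + m : Nat) : Int))
            = (pre ++ pvMkRun (m + 1)) ++ List.replicate (r.length - m) false := by
          unfold markB
          have e1 : ((pre.length + m : Nat) : Int) - ((pre.length : Nat) : Int) = ((m : Nat) : Int) := by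
            push_cast; ring
          rw [e1]
          rw [show PySem.Int.floordiv ((m : Nat) : Int) 2 = ((m / 2 : Nat) : Int) from
            (by exact_mod_cast PySem.Int.floordiv_natCast m 2)]
          have e2 : ((pre.length : Nat) : Int) + ((m / 2 : Nat) : Int) = ((pre.length + m / 2 : Nat) : Int) := by
            push_cast; ring
          rw [e2, PySem.List.pySetD_natCast]
          have esplit : List.replicate (true :: r).length false
              = List.replicate (m + 1) false ++ List.replicate (r.length - m) false := by
            rw [List.replicate_append_replicate]
            congr 1
            simp
            omega
          rw [esplit]
          rw [List.set_append_right _ _ (by omega)]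
          simp only [Nat.add_sub_cancel_left]
          rw [List.set_append_left _ _ (by simp; omega)]
          simp [pvMkRun]
        rw [hmark]
        have hpre' : (pre ++ pvMkRun (m + 1)).length = pre.length + m + 1 := by
          simp [pvMkRun]
          omega
        have h1 := ih (r.length - m) (by simp at hlen; omega) (r.drop m) (by simp) (pre ++ pvMkRun (m + 1))
        rw [hpre', List.length_drop] at h1
        have eoff : pre.length + m + 1 = pre.length + m + 1 := rfl
        rw [h1]
        conv_rhs => rw [show pvGo (true :: r) = pvMkRun (pvRunLen r + 1) ++ pvGo (r.drop (pvRunLen r)) from by rw [pvGo]]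
        rw [← hmdef]
        simp

theorem portB_eq_pvGo (data : List Bool) : merge_true_islands_center_alt data = pvGo data := by
  unfold merge_true_islands_center_alt
  show (((PySem.List.pyRange 0 (PySem.List.len data) 1).filter (condStart data)).zip
      ((PySem.List.pyRange 0 (PySem.List.len data) 1).filter (condEnd data))).foldl markB
      (List.replicate (PySem.List.len data).toNat false) = pvGo data
  rw [show PySem.List.len data = (data.length : Int) from rfl]
  rw [PySem.List.pyRange_one]
  rw [List.filter_map, List.filter_map, List.zip_map, List.foldl_map]
  have hrange : (((data.length : Int) - 0).toNat) = data.length := by omega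
  rw [hrange]
  have hs : (List.range data.length).filter ((condStart data) ∘ (fun k : Nat => (0 : Int) + (k : Int)))
      = pvStarts data false 0 := by
    have h := starts_filter data []
    simp only [List.nil_append, List.length_nil, List.getLastD_nil] at h
    rw [List.range_eq_range']
    simpa [Function.comp] using h
  have he : (List.range data.length).filter ((condEnd data) ∘ (fun k : Nat => (0 : Int) + (k : Int)))
      = pvEnds data 0 := by
    have h := ends_filter data []
    simp only [List.nil_append, List.length_nil] at h
    rw [List.range_eq_range']
    simpa [Function.comp] using h
  rw [hs, he, zip_runPairs data.length data rfl 0]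
  have hfn : (fun (res : List Bool) (p : Nat × Nat) =>
        markB res (Prod.map (fun k : Nat => (0 : Int) + (k : Int)) (fun k : Nat => (0 : Int) + (k : Int)) p))
      = fun res p => markB res ((p.1 : Int), (p.2 : Int)) := by
    funext res p
    simp [Prod.map]
  rw [hfn]
  have etn : ((data.length : Int)).toNat = data.length := by omega
  rw [etn]
  simpa using fold_runPairs data.length data rfl []

-- ===== VERDICT =====
theorem merge_true_islands_center_spec : Claim_equal_merge_true_islands_center := by
  intro data _
  unfold Spec_merge_true_islands_center
  rw [portA_eq_pvGo, portB_eq_pvGo]
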